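-- pv_equiv track=rewrite | github.com/ttl2004/PTIT-CODE | Python/PYKT087-So dac biet.py | xuly
-- ===== SOURCE A (Python) =====
-- MOD = 10**9 + 7
--
-- def xuly(N, K):
--     result = 0
--     f = 1
--     while K > 0:
--         if K % 2 == 1:
--             result = (result + f) % MOD
--         f = (f * N) % MOD
--         K //= 2
--
--     return result
-- ===== SOURCE B (Python) =====
-- MOD = 10**9 + 7
--
-- def xuly(N, K):
--     bits = []
--     while K > 0:
--         bits.append(K % 2)
--         K //= 2
--     result = 0
--     for bit in reversed(bits):
--         result = (result * N + bit) % MOD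
--     return result
-- ===== Notes on version B (the rewrite author's own statement) =====
-- stated objective: alternative
-- what changed: B first extracts K's binary digits low-to-high, then evaluates the bit-polynomial at N by Horner's rule MSB-to-LSB, maintaining only one accumulator instead of A's running power f and additive result.
import Mathlib
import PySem

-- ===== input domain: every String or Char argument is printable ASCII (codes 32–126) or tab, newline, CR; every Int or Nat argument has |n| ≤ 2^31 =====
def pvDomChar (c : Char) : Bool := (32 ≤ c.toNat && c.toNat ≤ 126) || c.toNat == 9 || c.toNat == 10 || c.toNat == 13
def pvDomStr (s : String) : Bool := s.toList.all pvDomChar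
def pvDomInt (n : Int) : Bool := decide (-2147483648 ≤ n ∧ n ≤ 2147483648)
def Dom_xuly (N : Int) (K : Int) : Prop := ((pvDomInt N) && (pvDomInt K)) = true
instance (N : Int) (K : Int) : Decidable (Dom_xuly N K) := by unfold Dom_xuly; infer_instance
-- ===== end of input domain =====

-- B replaces A's running-power accumulation (LSB first, two accumulators) by Horner evaluation
-- of K's bit list MSB first with a single accumulator; objective: alternative decomposition.

-- ===== PORT A =====
-- A's while-loop: state (result, f), recursing on K //= 2.
def xulyLoop (N : Int) (K : Int) (result : Int) (f : Int) : Int :=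
  if h : 0 < K then
    xulyLoop N (PySem.Int.floordiv K 2)
      (if PySem.Int.mod K 2 = 1 then PySem.Int.mod (result + f) 1000000007 else result)
      (PySem.Int.mod (f * N) 1000000007)
  else result
termination_by K.toNat
decreasing_by
  have h2 : PySem.Int.floordiv K 2 = K / 2 := PySem.Int.floordiv_eq_ediv_of_pos (by omega)
  rw [h2]; omega

def xuly (N : Int) (K : Int) : Int := xulyLoop N K 0 1

-- ===== PORT B =====
-- bits low-to-high (the `while K > 0: bits.append(K % 2); K //= 2` loop)
def bitsOf (K : Int) : List Int :=
  if h : 0 < K then PySem.Int.mod K 2 :: bitsOf (PySem.Int.floordiv K 2) else []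
termination_by K.toNat
decreasing_by
  have h2 : PySem.Int.floordiv K 2 = K / 2 := PySem.Int.floordiv_eq_ediv_of_pos (by omega)
  rw [h2]; omega

-- Horner over reversed(bits)
def xuly_alt (N : Int) (K : Int) : Int :=
  (bitsOf K).reverse.foldl (fun r b => PySem.Int.mod (r * N + b) 1000000007) 0

-- ===== PRECONDITION & SPEC =====
def Spec_xuly (N : Int) (K : Int) (out : Int) : Prop := out = xuly_alt N K
instance (N : Int) (K : Int) (out : Int) : Decidable (Spec_xuly N K out) := by unfold Spec_xuly; infer_instance

-- ===== CLAIM (what is proved, stated in full; the proofs are below) =====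
def Claim_equal_xuly : Prop := ∀ (N : Int) (K : Int), Dom_xuly N K → Spec_xuly N K (xuly N K)

-- ===== LEMMAS AND PROOFS =====

-- value of the bit polynomial at N, no reduction
def polyV (N : Int) : List Int → Int
  | [] => 0
  | b :: bs => b + N * polyV N bs

lemma pymod_emod (a : Int) : PySem.Int.mod a 1000000007 = a % 1000000007 :=
  PySem.Int.mod_eq_emod_of_pos (by norm_num)

lemma mod_absorb (a b c m : Int) : (a % m + b % m * c) % m = (a + b * c) % m := by
  rw [Int.add_emod, Int.mul_emod, Int.emod_emod_of_dvd _ dvd_rfl,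
      Int.emod_emod_of_dvd _ dvd_rfl, ← Int.mul_emod, ← Int.add_emod]

lemma xulyLoop_eq (N : Int) : ∀ (K r f : Int), 0 ≤ r → r < 1000000007 →
    xulyLoop N K r f = (r + f * polyV N (bitsOf K)) % 1000000007 := by
  intro K
  induction hK : K.toNat using Nat.strong_induction_on generalizing K with
  | _ n ih =>
    intro r f hr0 hr1
    by_cases h : 0 < K
    · rw [xulyLoop, bitsOf, dif_pos h, dif_pos h, polyV]
      have h2 : PySem.Int.floordiv K 2 = K / 2 := PySem.Int.floordiv_eq_ediv_of_pos (by omega)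
      have hm : PySem.Int.mod K 2 = K % 2 := PySem.Int.mod_eq_emod_of_pos (by norm_num)
      have hlt : (K / 2).toNat < n := by omega
      have hmb : 0 ≤ (r + f) % 1000000007 ∧ (r + f) % 1000000007 < 1000000007 :=
        ⟨Int.emod_nonneg _ (by norm_num), Int.emod_lt_of_pos _ (by norm_num)⟩
      rw [h2]
      by_cases hb : PySem.Int.mod K 2 = 1
      · rw [if_pos hb, pymod_emod, pymod_emod,
            ih _ hlt _ rfl _ _ hmb.1 hmb.2, mod_absorb, hb]
        congr 1; ring
      · rw [if_neg hb, pymod_emod,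
            ih _ hlt _ rfl _ _ hr0 hr1]
        have hb0 : PySem.Int.mod K 2 = 0 := by
          rw [hm] at hb ⊢; omega
        rw [hb0]
        have hre : r = r % 1000000007 := (Int.emod_eq_of_lt hr0 hr1).symm
        conv_lhs => rw [hre]
        rw [mod_absorb]
        congr 1; ring
    · rw [xulyLoop, bitsOf, dif_neg h, dif_neg h, polyV]
      rw [mul_zero, add_zero, Int.emod_eq_of_lt hr0 hr1]

lemma alt_eq (N : Int) (K : Int) :
    xuly_alt N K = polyV N (bitsOf K) % 1000000007 := by
  unfold xuly_alt
  rw [List.foldl_reverse]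
  induction bitsOf K with
  | nil => simp [polyV]
  | cons b bs ih =>
    rw [List.foldr_cons, ih, polyV, pymod_emod]
    rw [Int.add_emod, Int.mul_emod, Int.emod_emod_of_dvd _ dvd_rfl,
        ← Int.mul_emod, ← Int.add_emod]
    ring_nf

-- ===== VERDICT (by name: the statement is the Claim_ definition above) =====
theorem xuly_spec : Claim_equal_xuly := by
  intro N K _
  unfold Spec_xuly xuly
  rw [xulyLoop_eq N K 0 1 le_rfl (by norm_num), alt_eq]
  ring_nf
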